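-- pv_equiv track=rewrite | github.com/PatrickPenner/dock_scripts | pipeline_elements/anchor.py | __get_corresponding_atom_record
-- ===== SOURCE A (Python) =====
-- def __get_corresponding_atom_record(query_atom_record, atom_records):
--     """Get corresponding atom record with equal coordinates"""
--     found_atom_record = None
--     for atom_record in atom_records:
--         if query_atom_record[2:5] == atom_record[2:5]:  # coordinate comparison
--             if found_atom_record:
--                 raise RuntimeError('Found multiple corresponding atom records')
--             found_atom_record = atom_record
--     return found_atom_record
-- ===== SOURCE B (Python) =====
-- def __get_corresponding_atom_record(query_atom_record, atom_records):
--     """Get corresponding atom record with equal coordinates"""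
--     index = {}
--     for atom_record in atom_records:
--         key = tuple(atom_record[2:5])
--         index[key] = index.get(key, []) + [atom_record]
--     matches = index.get(tuple(query_atom_record[2:5]), [])
--     if len(matches) > 1:
--         raise RuntimeError('Found multiple corresponding atom records')
--     return matches[0] if matches else None
-- ===== Notes on version B (the rewrite author's own statement) =====
-- stated objective: alternative
-- what changed: B builds a dictionary index grouping every record by its coordinate slice, then answers with a single lookup of the query's key, instead of A's fused scan that carries a found-record variable with a truthiness test.
-- outside the precondition, e.g. on __get_corresponding_atom_record([], [[], []]): A returns [], B raises RuntimeError
import Mathlib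
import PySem

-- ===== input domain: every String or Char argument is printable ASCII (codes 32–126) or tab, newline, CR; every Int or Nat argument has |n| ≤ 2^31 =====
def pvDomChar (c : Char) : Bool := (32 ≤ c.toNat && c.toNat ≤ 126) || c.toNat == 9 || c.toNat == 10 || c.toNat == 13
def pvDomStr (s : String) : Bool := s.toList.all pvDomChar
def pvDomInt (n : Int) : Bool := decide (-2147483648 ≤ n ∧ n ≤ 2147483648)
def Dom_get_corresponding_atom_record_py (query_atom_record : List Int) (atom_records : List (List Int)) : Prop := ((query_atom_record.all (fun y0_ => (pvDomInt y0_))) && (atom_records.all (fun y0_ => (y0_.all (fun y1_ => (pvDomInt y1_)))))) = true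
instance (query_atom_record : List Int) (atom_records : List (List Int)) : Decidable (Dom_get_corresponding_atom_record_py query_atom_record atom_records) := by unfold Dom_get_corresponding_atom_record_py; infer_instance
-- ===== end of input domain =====

-- ===== PORT A =====
-- B builds a dictionary index grouping records by coordinate slice and answers by one lookup;
-- A fuses scan and decision. Return-value equivalence on Pre_.
-- loop of A: found_atom_record carried through the scan; Python truthiness of a list = nonempty;
-- the 'raise' branch is unreachable inside Pre_ (at most one match), where we leave 'found' unchanged.
def goA (key : List Int) : List (List Int) → Option (List Int) → Option (List Int)
  | [], found => found
  | r :: rest, found =>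
    if key == PySem.List.slice r (some 2) (some 5) then
      match found with
      | some m => if m == [] then goA key rest (some r) else goA key rest found  -- truthy found ⇒ raise (outside Pre_)
      | none => goA key rest (some r)
    else goA key rest found

def get_corresponding_atom_record_py (query_atom_record : List Int) (atom_records : List (List Int)) : Option (List Int) :=
  goA (PySem.List.slice query_atom_record (some 2) (some 5)) atom_records none

-- ===== PORT B =====
def get_corresponding_atom_record_py_alt (query_atom_record : List Int) (atom_records : List (List Int)) : Option (List Int) :=
  let index := atom_records.foldl
    (fun d r => d.modify (PySem.List.slice r (some 2) (some 5)) [] (· ++ [r]))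
    (PySem.Dict.empty : PySem.Dict (List Int) (List (List Int)))
  let found_here := index.getD (PySem.List.slice query_atom_record (some 2) (some 5)) []
  if found_here.length > 1 then none  -- B raises RuntimeError here (outside Pre_)
  else found_here.head?

-- ===== PRECONDITION & SPEC =====
-- Pre_ excludes inputs with two or more coordinate-matching records: there A either raises RuntimeError, or
-- (when the first matching record is the empty list, falsy in Python) accidentally returns the last match
-- while B raises; B raises RuntimeError on all of them.
def Pre_get_corresponding_atom_record_py (query_atom_record : List Int) (atom_records : List (List Int)) : Prop :=
  (atom_records.filter (fun r => PySem.List.slice query_atom_record (some 2) (some 5) == PySem.List.slice r (some 2) (some 5))).length ≤ 1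
instance (query_atom_record : List Int) (atom_records : List (List Int)) : Decidable (Pre_get_corresponding_atom_record_py query_atom_record atom_records) := by unfold Pre_get_corresponding_atom_record_py; infer_instance
def pvWitness_get_corresponding_atom_record_py : List Int × List (List Int) := ([1, 2, 3, 4, 5], [[0, 0, 3, 4, 5], [9, 9, 9]])
def Spec_get_corresponding_atom_record_py (query_atom_record : List Int) (atom_records : List (List Int)) (out : Option (List Int)) : Prop := out = get_corresponding_atom_record_py_alt query_atom_record atom_records
instance (query_atom_record : List Int) (atom_records : List (List Int)) (out : Option (List Int)) : Decidable (Spec_get_corresponding_atom_record_py query_atom_record atom_records out) := by unfold Spec_get_corresponding_atom_record_py; infer_instance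

-- ===== CLAIM (what is proved, stated in full; the proofs are below) =====
def Claim_equal_get_corresponding_atom_record_py : Prop := ∀ (query_atom_record : List Int) (atom_records : List (List Int)), Dom_get_corresponding_atom_record_py query_atom_record atom_records → Pre_get_corresponding_atom_record_py query_atom_record atom_records → Spec_get_corresponding_atom_record_py query_atom_record atom_records (get_corresponding_atom_record_py query_atom_record atom_records)

-- ===== LEMMAS AND PROOFS =====
theorem goA_no_match (key : List Int) (rs : List (List Int)) (found : Option (List Int))
    (h : rs.filter (fun r => key == PySem.List.slice r (some 2) (some 5)) = []) : goA key rs found = found := by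
  induction rs generalizing found with
  | nil => rfl
  | cons r rest ih =>
    simp only [List.filter_cons] at h
    split at h
    · exact absurd h (by simp)
    · simpa [goA, *] using ih found h

theorem goA_head (key : List Int) (rs : List (List Int))
    (h : (rs.filter (fun r => key == PySem.List.slice r (some 2) (some 5))).length ≤ 1) :
    goA key rs none = (rs.filter (fun r => key == PySem.List.slice r (some 2) (some 5))).head? := by
  induction rs with
  | nil => rfl
  | cons r rest ih =>
    simp only [List.filter_cons] at h ⊢
    by_cases hm : (key == PySem.List.slice r (some 2) (some 5)) = true
    · simp only [hm, if_true] at h ⊢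
      simp only [List.length_cons] at h
      have hnil : rest.filter (fun r => key == PySem.List.slice r (some 2) (some 5)) = [] :=
        List.eq_nil_of_length_eq_zero (by omega)
      simp [goA, hm, goA_no_match _ _ _ hnil]
    · simp only [hm] at h ⊢
      simpa [goA, hm] using ih h

-- B's index lookup equals the list of coordinate-matching records.
theorem index_getD (key : List Int) (rs : List (List Int)) :
    (rs.foldl (fun d r => d.modify (PySem.List.slice r (some 2) (some 5)) [] (· ++ [r]))
      (PySem.Dict.empty : PySem.Dict (List Int) (List (List Int)))).getD key []
    = rs.filter (fun r => key == PySem.List.slice r (some 2) (some 5)) := by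
  have hfold : rs.foldl (fun d r => d.modify (PySem.List.slice r (some 2) (some 5)) [] (· ++ [r]))
      (PySem.Dict.empty : PySem.Dict (List Int) (List (List Int)))
    = (rs.map (fun r => (PySem.List.slice r (some 2) (some 5), r))).foldl
        (fun d p => d.modify p.1 [] (· ++ [p.2])) PySem.Dict.empty := by
    rw [List.foldl_map]
  rw [hfold, PySem.Dict.getD_foldl_modify_append]
  simp [List.filter_map, Function.comp_def]
  exact List.filter_congr (fun r _ => by simp [eq_comm])

-- ===== VERDICT (by name: the statement is the Claim_ definition above) =====
theorem get_corresponding_atom_record_py_spec : Claim_equal_get_corresponding_atom_record_py := by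
  intro q rs _ hpre
  unfold Spec_get_corresponding_atom_record_py
  unfold Pre_get_corresponding_atom_record_py at hpre
  unfold get_corresponding_atom_record_py get_corresponding_atom_record_py_alt
  simp only [index_getD]
  rw [goA_head _ _ hpre]
  have : ¬ (rs.filter (fun r => PySem.List.slice q (some 2) (some 5) == PySem.List.slice r (some 2) (some 5))).length > 1 := by omega
  simp [this]
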